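-- pv_equiv track=rewrite | github.com/yhakana/25070201_FCST-report-transfer-tool | test.py | merge_multilevel_header
-- ===== SOURCE A (Python) =====
-- def merge_multilevel_header(header1, header2):
--     header1_filled = header1.copy()
--     last_main = ""
--     for i in range(len(header1_filled)):
--         if header1_filled[i]:
--             last_main = header1_filled[i]
--         else:
--             header1_filled[i] = last_main
--
--     final_headers = []
--     for h1, h2 in zip(header1_filled, header2):
--         h1 = h1.strip() if isinstance(h1, str) else ""
--         h2 = h2.strip() if isinstance(h2, str) else ""
--         if h1 and h2:
--             final_headers.append(f"{h1}_{h2}")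
--         elif not h1 and h2:
--             final_headers.append(h2)
--         elif h1 and not h2:
--             final_headers.append(h1)
--         else:
--             final_headers.append("")
--     return final_headers
-- ===== SOURCE B (Python) =====
-- def merge_multilevel_header(header1, header2):
--     final_headers = []
--     last_main = ""
--     for h1_raw, h2_raw in zip(header1, header2):
--         if h1_raw:
--             last_main = h1_raw
--         h1 = last_main.strip() if isinstance(last_main, str) else ""
--         h2 = h2_raw.strip() if isinstance(h2_raw, str) else ""
--         if h1 and h2:
--             final_headers.append(f"{h1}_{h2}")
--         elif h2:
--             final_headers.append(h2)
--         elif h1: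
--             final_headers.append(h1)
--         else:
--             final_headers.append("")
--     return final_headers
-- ===== Notes on version B (the rewrite author's own statement) =====
-- stated objective: simpler
-- what changed: Single fused loop over zip(header1, header2) carrying a running last_main variable replaces A's two passes (building a forward-filled copy of header1, then zipping it with header2).
import Mathlib
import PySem

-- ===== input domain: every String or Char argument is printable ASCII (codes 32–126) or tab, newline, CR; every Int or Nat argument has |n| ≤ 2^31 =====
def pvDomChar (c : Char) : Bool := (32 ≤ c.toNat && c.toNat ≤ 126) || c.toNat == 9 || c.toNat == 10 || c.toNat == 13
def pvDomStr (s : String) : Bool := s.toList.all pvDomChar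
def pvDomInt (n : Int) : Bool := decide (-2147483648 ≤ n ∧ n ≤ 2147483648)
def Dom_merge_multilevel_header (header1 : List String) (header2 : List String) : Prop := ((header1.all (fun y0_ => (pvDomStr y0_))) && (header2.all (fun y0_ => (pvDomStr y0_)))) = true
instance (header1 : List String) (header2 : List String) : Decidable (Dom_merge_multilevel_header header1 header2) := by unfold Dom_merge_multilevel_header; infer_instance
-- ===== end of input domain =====

-- B fuses A's two passes (forward-fill copy of header1, then zip-combine with header2)
-- into one loop over the zip carrying a running last_main; objective: simpler.
-- ===== PORT A =====
-- forward-fill pass over header1 carrying last_main (A's first loop)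
def pvFillA : List String -> String -> List String
  | [], _ => []
  | h :: t, last => if h ≠ "" then h :: pvFillA t h else last :: pvFillA t last

-- the four-way branch of A's second loop, one cell
def pvCellA (h1r h2r : String) : String :=
  let h1 := PySem.Str.strip h1r
  let h2 := PySem.Str.strip h2r
  if h1 ≠ "" ∧ h2 ≠ "" then h1 ++ "_" ++ h2
  else if h1 = "" ∧ h2 ≠ "" then h2
  else if h1 ≠ "" ∧ h2 = "" then h1
  else ""

def merge_multilevel_header (header1 : List String) (header2 : List String) : List String :=
  (List.zip (pvFillA header1 "") header2).map (fun p => pvCellA p.1 p.2)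

-- ===== PORT B =====
-- same four-way branch, B's decomposition (elif chain collapsed)
def pvCellB (h1r h2r : String) : String :=
  let h1 := PySem.Str.strip h1r
  let h2 := PySem.Str.strip h2r
  if h1 ≠ "" ∧ h2 ≠ "" then h1 ++ "_" ++ h2
  else if h2 ≠ "" then h2
  else if h1 ≠ "" then h1
  else ""

-- single fused loop over the zip of the two headers, carrying last_main
def pvMergeB : List String -> List String -> String -> List String
  | h :: t1, g :: t2, last =>
    let last' := if h ≠ "" then h else last
    pvCellB last' g :: pvMergeB t1 t2 last'
  | _, _, _ => []

def merge_multilevel_header_alt (header1 : List String) (header2 : List String) : List String :=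
  pvMergeB header1 header2 ""

-- ===== PRECONDITION & SPEC =====
def Spec_merge_multilevel_header (header1 : List String) (header2 : List String) (out : List String) : Prop := out = merge_multilevel_header_alt header1 header2
instance (header1 : List String) (header2 : List String) (out : List String) : Decidable (Spec_merge_multilevel_header header1 header2 out) := by unfold Spec_merge_multilevel_header; infer_instance

-- ===== CLAIM (what is proved, stated in full; the proofs are below) =====
def Claim_equal_merge_multilevel_header : Prop := ∀ (header1 : List String) (header2 : List String), Dom_merge_multilevel_header header1 header2 → Spec_merge_multilevel_header header1 header2 (merge_multilevel_header header1 header2)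

-- ===== LEMMAS AND PROOFS =====
theorem pvCell_eq (a b : String) : pvCellA a b = pvCellB a b := by
  unfold pvCellA pvCellB
  by_cases h1 : PySem.Str.strip a = "" <;> by_cases h2 : PySem.Str.strip b = "" <;>
    simp [h1, h2]

theorem pvMain : ∀ (h1 h2 : List String) (last : String),
    (List.zip (pvFillA h1 last) h2).map (fun p => pvCellA p.1 p.2) = pvMergeB h1 h2 last := by
  intro h1
  induction h1 with
  | nil => intro h2 last; simp [pvFillA, pvMergeB]
  | cons a t ih =>
    intro h2 last
    cases h2 with
    | nil => by_cases ha : a = "" <;> simp [pvFillA, pvMergeB, ha]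
    | cons b t2 =>
      by_cases ha : a = "" <;>
      · simp [pvFillA, pvMergeB, ha, pvCell_eq]
        rw [← ih]
        simp [pvCell_eq]

-- ===== VERDICT (by name: the statement is the Claim_ definition above) =====
theorem merge_multilevel_header_spec : Claim_equal_merge_multilevel_header := by
  intro h1 h2 _
  show _ = _
  unfold merge_multilevel_header merge_multilevel_header_alt
  exact pvMain h1 h2 ""
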